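-- pv_equiv track=rewrite | github.com/AdamZhouSE/pythonHomework | Code/CodeRecords/2479/60602/270019.py | abnormalStr
-- ===== SOURCE A (Python) =====
-- def abnormalStr(stringA,stringB):
--     judge=True;
--     i=0;
--     ans="";
--     while(i<len(stringA)):
--         j=0;
--         while(j<len(stringB)):
--             if(stringA[i]==stringB[j]):
--                 judge=False;
--             j+=1;
--         if(judge):
--             x=0;
--             while(x<len(ans)):
--                 if(ans[x]==stringA[i]):
--                     judge=False;
--                 x+=1;
--             if(judge):
--                 ans+=stringA[i];
--         i+=1;
--         judge=True;
--     return ans;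
-- ===== SOURCE B (Python) =====
-- def abnormalStr(stringA, stringB):
--     # Build the answer back-to-front: walk stringA from the right, keeping the
--     # answer for the suffix; duplicates are removed by deleting the current
--     # char from the suffix answer before prepending it (no 'seen' set).
--     res = []
--     for ch in reversed(stringA):
--         res = [c for c in res if c != ch]
--         if ch not in stringB:
--             res.insert(0, ch)
--     return ''.join(res)
-- ===== Notes on version B (the rewrite author's own statement) =====
-- stated objective: alternative
-- what changed: A scans forward appending each char after index-based membership scans over stringB and the growing answer; B instead builds the answer back-to-front: it walks stringA from the right maintaining the suffix answer, deletes the current char's occurrences from it (dedup by deletion, no seen-structure), and prepends the char if absent from stringB.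
import Mathlib
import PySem

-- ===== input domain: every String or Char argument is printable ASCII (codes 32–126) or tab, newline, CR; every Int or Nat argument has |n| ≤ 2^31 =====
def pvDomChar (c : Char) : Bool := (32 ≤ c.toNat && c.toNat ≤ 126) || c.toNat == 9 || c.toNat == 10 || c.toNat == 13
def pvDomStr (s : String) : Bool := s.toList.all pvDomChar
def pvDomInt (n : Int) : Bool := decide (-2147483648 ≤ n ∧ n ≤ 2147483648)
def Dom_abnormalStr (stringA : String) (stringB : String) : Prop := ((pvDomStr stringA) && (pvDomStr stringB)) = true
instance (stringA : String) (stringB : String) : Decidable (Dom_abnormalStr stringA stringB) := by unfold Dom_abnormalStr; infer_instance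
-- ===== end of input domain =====

-- B builds the answer back-to-front (dedup by deletion from the suffix answer) instead of A's forward pass with membership scans; alternative decomposition, same cost.


-- ===== PORT A =====
-- outer while over stringA's chars; inner while over stringB, then over ans, each setting judge
def abLoopA (bs : List Char) (ans : List Char) : List Char → List Char
  | [] => ans
  | c :: rest =>
      let judge := bs.foldl (fun j b => if c == b then false else j) true
      if judge then
        let judge2 := ans.foldl (fun j x => if x == c then false else j) true
        if judge2 then abLoopA bs (ans ++ [c]) rest else abLoopA bs ans rest
      else abLoopA bs ans rest

def abnormalStr (stringA : String) (stringB : String) : String :=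
  String.ofList (abLoopA stringB.toList [] stringA.toList)

-- ===== PORT B =====
-- loop over reversed(stringA) carrying res: delete ch from res, prepend ch if ch not in stringB
def abLoopB (bs : List Char) (res : List Char) : List Char → List Char
  | [] => res
  | ch :: rest =>
      let res' := res.filter (fun c => !(c == ch))
      abLoopB bs (if !(bs.contains ch) then ch :: res' else res') rest

def abnormalStr_alt (stringA : String) (stringB : String) : String :=
  String.ofList (abLoopB stringB.toList [] stringA.toList.reverse)

-- ===== PRECONDITION & SPEC =====
def Spec_abnormalStr (stringA : String) (stringB : String) (out : String) : Prop := out = abnormalStr_alt stringA stringB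
instance (stringA : String) (stringB : String) (out : String) : Decidable (Spec_abnormalStr stringA stringB out) := by unfold Spec_abnormalStr; infer_instance

-- ===== CLAIM (what is proved, stated in full; the proofs are below) =====
def Claim_equal_abnormalStr : Prop := ∀ (stringA : String) (stringB : String), Dom_abnormalStr stringA stringB → Spec_abnormalStr stringA stringB (abnormalStr stringA stringB)

-- ===== LEMMAS AND PROOFS =====

-- proof-only recursive characterisation of ordered dedup
def dedupR : List Char → List Char
  | [] => []
  | c :: rest => c :: (dedupR rest).filter (fun x => !(x == c))

theorem judge_fold_left (c : Char) (bs : List Char) : ∀ (j : Bool),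
    bs.foldl (fun j b => if c == b then false else j) j = (j && !(bs.contains c)) := by
  induction bs with
  | nil => intro j; simp
  | cons b rest ih =>
      intro j
      rw [List.foldl_cons, ih]
      by_cases h : c = b
      · subst h; simp
      · have h1 : (c == b) = false := by simp [h]
        have h2 : (b == c) = false := by simp [Ne.symm h]
        simp [h1, h]

theorem judge_fold_right (c : Char) (xs : List Char) : ∀ (j : Bool),
    xs.foldl (fun j x => if x == c then false else j) j = (j && !(xs.contains c)) := by
  induction xs with
  | nil => intro j; simp
  | cons x rest ih =>
      intro j
      rw [List.foldl_cons, ih]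
      by_cases h : x = c
      · subst h; simp
      · have h1 : (x == c) = false := by simp [h]
        simp [h1, Ne.symm h]

theorem abLoopA_eq (bs : List Char) (as : List Char) : ∀ (ans : List Char),
    abLoopA bs ans as
      = ans ++ (dedupR as).filter (fun c => !(bs.contains c) && !(ans.contains c)) := by
  induction as with
  | nil => intro ans; simp [abLoopA, dedupR]
  | cons c rest ih =>
      intro ans
      show (let judge := bs.foldl (fun j b => if c == b then false else j) true
            if judge then
              let judge2 := ans.foldl (fun j x => if x == c then false else j) true
              if judge2 then abLoopA bs (ans ++ [c]) rest else abLoopA bs ans rest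
            else abLoopA bs ans rest) = _
      rw [show bs.foldl (fun j b => if c == b then false else j) true = !(bs.contains c) from by
        rw [judge_fold_left]; simp]
      rw [show ans.foldl (fun j x => if x == c then false else j) true = !(ans.contains c) from by
        rw [judge_fold_right]; simp]
      simp only [dedupR, List.filter_cons]
      by_cases hb : bs.contains c = true
      · rw [show (!bs.contains c) = false from by rw [hb]; rfl, if_neg Bool.false_ne_true, ih,
          Bool.false_and, if_neg Bool.false_ne_true, List.filter_filter]
        congr 1
        refine List.filter_congr (fun x _ => ?_)
        by_cases hx : x = c
        · subst hx; rw [hb]; rfl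
        · have h1 : (x == c) = false := by simp [hx]
          rw [h1]; simp
      · have hb0 : bs.contains c = false := eq_false_of_ne_true hb
        rw [show (!bs.contains c) = true from by rw [hb0]; rfl, if_pos rfl]
        by_cases ha : ans.contains c = true
        · rw [show (!ans.contains c) = false from by rw [ha]; rfl, if_neg Bool.false_ne_true, ih,
            if_neg (show ¬((true && false) = true) from by decide), List.filter_filter]
          congr 1
          refine List.filter_congr (fun x _ => ?_)
          by_cases hx : x = c
          · subst hx; rw [ha]; simp
          · have h1 : (x == c) = false := by simp [hx]
            rw [h1]; simp
        · have ha0 : ans.contains c = false := eq_false_of_ne_true ha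
          rw [show (!ans.contains c) = true from by rw [ha0]; rfl, if_pos rfl, ih,
            if_pos (show (true && true) = true from rfl), List.filter_filter, List.append_assoc, List.singleton_append]
          congr 2
          refine List.filter_congr (fun x _ => ?_)
          simp only [List.contains_append, List.contains_cons, List.contains_nil]
          by_cases hx : x = c
          · subst hx; simp
          · have h1 : (x == c) = false := by simp [hx]
            have h2 : (c == x) = false := by simp [Ne.symm hx]
            cases hxb : (bs.contains x) <;> cases hxa : decide (x ∈ ans) <;> simp [h1, hxa]

-- abLoopB is a left fold
theorem abLoopB_eq_foldl (bs : List Char) : ∀ (xs res : List Char),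
    abLoopB bs res xs
      = xs.foldl (fun r ch =>
          let r' := r.filter (fun c => !(c == ch))
          if !(bs.contains ch) then ch :: r' else r') res := by
  intro xs
  induction xs with
  | nil => intro res; simp [abLoopB]
  | cons ch rest ih => intro res; simp only [abLoopB, List.foldl_cons]; exact ih _

-- the back-to-front loop computes filter (∉ bs) ∘ dedupR
theorem abLoopB_rev_eq (bs : List Char) (as : List Char) :
    abLoopB bs [] as.reverse = (dedupR as).filter (fun c => !(bs.contains c)) := by
  rw [abLoopB_eq_foldl, List.foldl_reverse]
  induction as with
  | nil => simp [dedupR]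
  | cons c rest ih =>
      rw [List.foldr_cons, ih]
      simp only [dedupR, List.filter_cons]
      by_cases hb : bs.contains c = true
      · rw [show (!bs.contains c) = false from by rw [hb]; rfl]
        simp only [Bool.false_eq_true, if_false, List.filter_filter]
        congr 1
        funext x
        rw [Bool.and_comm]
      · have hb0 : bs.contains c = false := eq_false_of_ne_true hb
        rw [show (!bs.contains c) = true from by rw [hb0]; rfl]
        simp only [if_true, List.filter_filter]
        congr 2
        funext x
        rw [Bool.and_comm]

-- ===== VERDICT (by name: the statement is the Claim_ definition above) =====
theorem abnormalStr_spec : Claim_equal_abnormalStr := by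
  intro stringA stringB _
  unfold Spec_abnormalStr abnormalStr abnormalStr_alt
  rw [abLoopA_eq, abLoopB_rev_eq]
  simp
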